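-- pv_equiv track=rewrite | github.com/josephwu273/google-foobar | 3-queue-to-do/solution.py | solution
-- ===== SOURCE A (Python) =====
-- from functools import reduce
--
-- def solution(start, length):
--     """
--     This solution relies on several XOR facts
--     1) For even number e, e^e+1=1
--     2) 1^1=0
--     3) x^0=x
--     """
--     simplified_xor = []
--     s = start
--     for i in range(length):
--         q = length-i
--         f = s+q-1
--         pairs = q//2
--         if s%2==1 and q%2==0:
--             #o(eo....eo)e
--             simplified_xor.append(s)
--             simplified_xor.append(f)
--             pairs = (q-2)//2
--         elif s%2==1 and q%2==1:
--             #o(eo...eo)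
--             simplified_xor.append(s)
--         elif s%2==0 and q%2==1:
--             #(eo...eo)e
--             simplified_xor.append(f)
--         else: #s%2==0 and q%2==0
--             #(eo...eo)
--             pass
--         simplified_xor.append(pairs%2)
--         s += length
--     return reduce(lambda x,y: x^y, simplified_xor)
-- ===== SOURCE B (Python) =====
-- def _g(n):
--     # prefix-XOR endpoint: g(n) = 0^1^...^n for n >= 0, extended so that
--     # g(n) = g(n-1) ^ n holds for every integer n
--     r = n % 4
--     if r == 0:
--         return n
--     if r == 1:
--         return 1
--     if r == 2:
--         return n + 1
--     return 0
--
-- def solution(start, length):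
--     acc = 0
--     for i in range(length):
--         s = start + i * length
--         f = s + (length - i) - 1
--         acc ^= _g(f) ^ _g(s - 1)
--     return acc
-- ===== Notes on version B (the rewrite author's own statement) =====
-- stated objective: simpler
-- what changed: Replaces A's parity case analysis that collects simplified terms into a list and then reduces it with a direct accumulator that XORs each row's range via the closed-form prefix-XOR endpoint formula g(n) indexed by n mod 4; no intermediate list, no reduce.
import Mathlib
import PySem

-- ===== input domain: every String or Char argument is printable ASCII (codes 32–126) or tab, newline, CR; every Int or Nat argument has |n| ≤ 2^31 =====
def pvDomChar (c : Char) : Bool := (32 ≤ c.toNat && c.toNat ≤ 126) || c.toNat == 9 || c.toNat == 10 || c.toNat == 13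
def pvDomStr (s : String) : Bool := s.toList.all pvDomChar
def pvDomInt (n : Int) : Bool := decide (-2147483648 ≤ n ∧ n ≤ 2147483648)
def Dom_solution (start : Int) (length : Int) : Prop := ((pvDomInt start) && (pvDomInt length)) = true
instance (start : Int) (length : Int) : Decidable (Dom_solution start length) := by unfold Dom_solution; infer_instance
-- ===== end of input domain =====

-- B replaces A's parity case analysis + list + reduce by a single accumulator
-- XORing each row's range via the closed-form prefix-XOR endpoint formula (objective: simpler).

-- ===== PORT A =====
-- reduce(lambda x,y: x^y, l); [] is where Python raises TypeError (excluded by Pre_)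
def pyReduceXor : List Int → Int
  | [] => 0
  | h :: t => t.foldl (fun x y => PySem.Int.bxor x y) h

-- one iteration of A's loop: state is (simplified_xor, s)
def solutionStep (length : Int) (acc : List Int × Int) (i : Int) : List Int × Int :=
  let s := acc.2
  let q := length - i
  let f := s + q - 1
  let pairs := PySem.Int.floordiv q 2
  if PySem.Int.mod s 2 = 1 ∧ PySem.Int.mod q 2 = 0 then
    (acc.1 ++ [s, f] ++ [PySem.Int.mod (PySem.Int.floordiv (q - 2) 2) 2], s + length)
  else if PySem.Int.mod s 2 = 1 ∧ PySem.Int.mod q 2 = 1 then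
    (acc.1 ++ [s] ++ [PySem.Int.mod pairs 2], s + length)
  else if PySem.Int.mod s 2 = 0 ∧ PySem.Int.mod q 2 = 1 then
    (acc.1 ++ [f] ++ [PySem.Int.mod pairs 2], s + length)
  else
    (acc.1 ++ [PySem.Int.mod pairs 2], s + length)

def solution (start : Int) (length : Int) : Int :=
  pyReduceXor ((PySem.List.pyRange 0 length 1).foldl (solutionStep length) ([], start)).1

-- ===== PORT B =====
-- g(n): prefix-XOR endpoint, g(n) = g(n-1) ^ n for every integer n
def gAlt (n : Int) : Int :=
  let r := PySem.Int.mod n 4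
  if r = 0 then n else if r = 1 then 1 else if r = 2 then n + 1 else 0

def solution_alt (start : Int) (length : Int) : Int :=
  (PySem.List.pyRange 0 length 1).foldl
    (fun acc i =>
      let s := start + i * length
      let f := s + (length - i) - 1
      PySem.Int.bxor acc (PySem.Int.bxor (gAlt f) (gAlt (s - 1)))) 0

-- ===== PRECONDITION & SPEC =====
-- Pre_ excludes length ≤ 0, where A's reduce() over the empty list raises TypeError.
def Pre_solution (start : Int) (length : Int) : Prop := 1 ≤ length
instance (start : Int) (length : Int) : Decidable (Pre_solution start length) := by
  unfold Pre_solution; infer_instance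

def pvWitness_solution : Int × Int := (3, 5)

def Spec_solution (start : Int) (length : Int) (out : Int) : Prop := out = solution_alt start length
instance (start : Int) (length : Int) (out : Int) : Decidable (Spec_solution start length out) := by
  unfold Spec_solution; infer_instance

-- ===== CLAIM (what is proved, stated in full; the proofs are below) =====
def Claim_equal_solution : Prop := ∀ (start : Int) (length : Int), Dom_solution start length → Pre_solution start length → Spec_solution start length (solution start length)

-- ===== LEMMAS AND PROOFS =====

-- sign/magnitude encoding of Int: bxor is xor on (sign bit, magnitude bits)
def pvDec : Bool × Nat → Int
  | (false, m) => (m : Int)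
  | (true, m) => -(m : Int) - 1

def pvEnc (a : Int) : Bool × Nat := if 0 ≤ a then (false, a.toNat) else (true, (-a - 1).toNat)

def pvXorP (p q : Bool × Nat) : Bool × Nat := (Bool.xor p.1 q.1, p.2 ^^^ q.2)

theorem pvEnc_dec (p : Bool × Nat) : pvEnc (pvDec p) = p := by
  rcases p with ⟨b, m⟩
  cases b <;> simp [pvDec, pvEnc] <;> omega

theorem pvBxor_eq (a b : Int) : PySem.Int.bxor a b = pvDec (pvXorP (pvEnc a) (pvEnc b)) := by
  unfold PySem.Int.bxor pvEnc pvXorP pvDec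
  split_ifs <;> simp

theorem pvBxor_assoc (a b c : Int) :
    PySem.Int.bxor (PySem.Int.bxor a b) c = PySem.Int.bxor a (PySem.Int.bxor b c) := by
  rw [pvBxor_eq a b, pvBxor_eq b c, pvBxor_eq _ c, pvBxor_eq a, pvEnc_dec, pvEnc_dec]
  rcases pvEnc a with ⟨x, m⟩; rcases pvEnc b with ⟨y, n⟩; rcases pvEnc c with ⟨z, k⟩
  simp [pvXorP, Nat.xor_assoc]

theorem pvBxor_zero_left (a : Int) : PySem.Int.bxor 0 a = a := by
  rw [PySem.Int.bxor_comm]; exact PySem.Int.bxor_zero a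

theorem pvBxor_left_comm (a b c : Int) :
    PySem.Int.bxor a (PySem.Int.bxor b c) = PySem.Int.bxor b (PySem.Int.bxor a c) := by
  rw [← pvBxor_assoc, PySem.Int.bxor_comm a b, pvBxor_assoc]

theorem pvBxor_one_of_even (a : Int) (h : a % 2 = 0) : PySem.Int.bxor a 1 = a + 1 := by
  unfold PySem.Int.bxor
  by_cases ha : 0 ≤ a
  · have h1 : (0:Int) ≤ 1 := by omega
    simp only [if_pos ha, if_pos h1]
    have := Nat.xor_one_of_even (Nat.even_iff.mpr (by omega : a.toNat % 2 = 0))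
    have ht : (1:Int).toNat = 1 := rfl
    rw [ht, this]
    omega
  · have h1 : (0:Int) ≤ 1 := by omega
    simp only [if_neg ha, if_pos h1]
    have := Nat.xor_one_of_odd (Nat.odd_iff.mpr (by omega : (-a - 1).toNat % 2 = 1))
    have ht : (1:Int).toNat = 1 := rfl
    rw [ht, this]
    omega

theorem pvBxor_one_of_odd (a : Int) (h : a % 2 = 1) : PySem.Int.bxor a 1 = a - 1 := by
  unfold PySem.Int.bxor
  by_cases ha : 0 ≤ a
  · have h1 : (0:Int) ≤ 1 := by omega
    simp only [if_pos ha, if_pos h1]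
    have := Nat.xor_one_of_odd (Nat.odd_iff.mpr (by omega : a.toNat % 2 = 1))
    have ht : (1:Int).toNat = 1 := rfl
    rw [ht, this]
    omega
  · have h1 : (0:Int) ≤ 1 := by omega
    simp only [if_neg ha, if_pos h1]
    have := Nat.xor_one_of_even (Nat.even_iff.mpr (by omega : (-a - 1).toNat % 2 = 0))
    have ht : (1:Int).toNat = 1 := rfl
    rw [ht, this]
    omega

-- gAlt through plain emod
theorem gAlt_eq (n : Int) :
    gAlt n = if n % 4 = 0 then n else if n % 4 = 1 then 1 else if n % 4 = 2 then n + 1 else 0 := by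
  have : PySem.Int.mod n 4 = n % 4 := PySem.Int.mod_eq_emod_of_pos (by omega)
  simp only [gAlt, this]

-- the list A appends in one iteration, in plain emod/ediv form
def pvChunk (s q : Int) : List Int :=
  if s % 2 = 1 ∧ q % 2 = 0 then [s, s + q - 1, ((q - 2) / 2) % 2]
  else if s % 2 = 1 ∧ q % 2 = 1 then [s, (q / 2) % 2]
  else if s % 2 = 0 ∧ q % 2 = 1 then [s + q - 1, (q / 2) % 2]
  else [(q / 2) % 2]

def pvXorL (l : List Int) : Int := l.foldl PySem.Int.bxor 0

theorem pvStep_eq (L : Int) (acc : List Int × Int) (i : Int) :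
    solutionStep L acc i = (acc.1 ++ pvChunk acc.2 (L - i), acc.2 + L) := by
  have h2 : ∀ a : Int, PySem.Int.mod a 2 = a % 2 := fun a => PySem.Int.mod_eq_emod_of_pos (by omega)
  have hd : ∀ a : Int, PySem.Int.floordiv a 2 = a / 2 := fun a => PySem.Int.floordiv_eq_ediv_of_pos (by omega)
  simp only [solutionStep, pvChunk, h2, hd]
  split_ifs <;> simp

theorem pvFoldl_bxor_init (l : List Int) (a : Int) :
    l.foldl PySem.Int.bxor a = PySem.Int.bxor a (pvXorL l) := by
  induction l generalizing a with
  | nil => simp [pvXorL, PySem.Int.bxor_zero]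
  | cons h t ih =>
    simp only [pvXorL, List.foldl_cons, pvBxor_zero_left] at *
    rw [ih, ih h, ← pvBxor_assoc]

theorem pvReduce_eq (l : List Int) : pyReduceXor l = pvXorL l := by
  cases l with
  | nil => rfl
  | cons h t =>
    simp only [pyReduceXor, pvXorL, List.foldl_cons, pvBxor_zero_left]

-- the heart: one row's simplified XOR equals the prefix-XOR endpoint difference
theorem pvBxor_cancel_left (a b : Int) :
    PySem.Int.bxor a (PySem.Int.bxor a b) = b := by
  rw [← pvBxor_assoc, PySem.Int.bxor_self, pvBxor_zero_left]

theorem pvRow_eq (s q : Int) :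
    pvXorL (pvChunk s q) = PySem.Int.bxor (gAlt (s + q - 1)) (gAlt (s - 1)) := by
  rcases (by omega : s % 4 = 0 ∨ s % 4 = 1 ∨ s % 4 = 2 ∨ s % 4 = 3) with hs|hs|hs|hs <;>
    rcases (by omega : q % 4 = 0 ∨ q % 4 = 1 ∨ q % 4 = 2 ∨ q % 4 = 3) with hq|hq|hq|hq
  · unfold pvChunk pvXorL
    rw [if_neg (by omega)]
    rw [if_neg (by omega)]
    rw [if_neg (by omega)]
    have hp : ((q / 2) % 2 : Int) = 0 := by omega
    rw [hp]
    rw [gAlt_eq, gAlt_eq]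
    rw [if_neg (by omega)]
    rw [if_neg (by omega)]
    rw [if_neg (by omega)]
    rw [if_neg (by omega)]
    rw [if_neg (by omega)]
    rw [if_neg (by omega)]
    simp only [List.foldl_cons, List.foldl_nil, pvBxor_zero_left]
  · unfold pvChunk pvXorL
    rw [if_neg (by omega)]
    rw [if_neg (by omega)]
    rw [if_pos (by omega)]
    have hp : ((q / 2) % 2 : Int) = 0 := by omega
    rw [hp]
    rw [gAlt_eq, gAlt_eq]
    rw [if_pos (by omega)]
    rw [if_neg (by omega)]
    rw [if_neg (by omega)]
    rw [if_neg (by omega)]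
    simp only [List.foldl_cons, List.foldl_nil, pvBxor_zero_left]
  · unfold pvChunk pvXorL
    rw [if_neg (by omega)]
    rw [if_neg (by omega)]
    rw [if_neg (by omega)]
    have hp : ((q / 2) % 2 : Int) = 1 := by omega
    rw [hp]
    rw [gAlt_eq, gAlt_eq]
    rw [if_neg (by omega)]
    rw [if_pos (by omega)]
    rw [if_neg (by omega)]
    rw [if_neg (by omega)]
    rw [if_neg (by omega)]
    simp only [List.foldl_cons, List.foldl_nil, pvBxor_zero_left]
    simp [PySem.Int.bxor_comm, pvBxor_zero_left]
  · unfold pvChunk pvXorL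
    rw [if_neg (by omega)]
    rw [if_neg (by omega)]
    rw [if_pos (by omega)]
    have hp : ((q / 2) % 2 : Int) = 1 := by omega
    rw [hp]
    rw [gAlt_eq, gAlt_eq]
    rw [if_neg (by omega)]
    rw [if_neg (by omega)]
    rw [if_pos (by omega)]
    rw [if_neg (by omega)]
    rw [if_neg (by omega)]
    rw [if_neg (by omega)]
    simp only [List.foldl_cons, List.foldl_nil, pvBxor_zero_left]
    rw [show s + q - 1 + 1 = PySem.Int.bxor (s + q - 1) 1 from ((pvBxor_one_of_even (s + q - 1) (by omega)).symm)]
    simp [PySem.Int.bxor_comm, pvBxor_zero_left]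
  · unfold pvChunk pvXorL
    rw [if_pos (by omega)]
    have hp : (((q - 2) / 2) % 2 : Int) = 1 := by omega
    rw [hp]
    rw [gAlt_eq, gAlt_eq]
    rw [if_pos (by omega)]
    rw [if_pos (by omega)]
    simp only [List.foldl_cons, List.foldl_nil, pvBxor_zero_left]
    rw [show s - 1 = PySem.Int.bxor s 1 from ((pvBxor_one_of_odd s (by omega)).symm)]
    simp [PySem.Int.bxor_comm, pvBxor_left_comm]
  · unfold pvChunk pvXorL
    rw [if_neg (by omega)]
    rw [if_pos (by omega)]
    have hp : ((q / 2) % 2 : Int) = 0 := by omega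
    rw [hp]
    rw [gAlt_eq, gAlt_eq]
    rw [if_neg (by omega)]
    rw [if_pos (by omega)]
    rw [if_pos (by omega)]
    simp only [List.foldl_cons, List.foldl_nil, pvBxor_zero_left]
    rw [show s - 1 = PySem.Int.bxor s 1 from ((pvBxor_one_of_odd s (by omega)).symm)]
    simp [pvBxor_left_comm, PySem.Int.bxor_self, PySem.Int.bxor_zero]
  · unfold pvChunk pvXorL
    rw [if_pos (by omega)]
    have hp : (((q - 2) / 2) % 2 : Int) = 0 := by omega
    rw [hp]
    rw [gAlt_eq, gAlt_eq]
    rw [if_neg (by omega)]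
    rw [if_neg (by omega)]
    rw [if_pos (by omega)]
    rw [if_pos (by omega)]
    simp only [List.foldl_cons, List.foldl_nil, pvBxor_zero_left]
    rw [show s + q - 1 + 1 = PySem.Int.bxor (s + q - 1) 1 from ((pvBxor_one_of_even (s + q - 1) (by omega)).symm)]
    rw [show s - 1 = PySem.Int.bxor s 1 from ((pvBxor_one_of_odd s (by omega)).symm)]
    simp [PySem.Int.bxor_comm, pvBxor_left_comm, pvBxor_zero_left, pvBxor_cancel_left]
  · unfold pvChunk pvXorL
    rw [if_neg (by omega)]
    rw [if_pos (by omega)]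
    have hp : ((q / 2) % 2 : Int) = 1 := by omega
    rw [hp]
    rw [gAlt_eq, gAlt_eq]
    rw [if_neg (by omega)]
    rw [if_neg (by omega)]
    rw [if_neg (by omega)]
    rw [if_pos (by omega)]
    simp only [List.foldl_cons, List.foldl_nil, pvBxor_zero_left]
    rw [show s - 1 = PySem.Int.bxor s 1 from ((pvBxor_one_of_odd s (by omega)).symm)]
  · unfold pvChunk pvXorL
    rw [if_neg (by omega)]
    rw [if_neg (by omega)]
    rw [if_neg (by omega)]
    have hp : ((q / 2) % 2 : Int) = 0 := by omega
    rw [hp]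
    rw [gAlt_eq, gAlt_eq]
    rw [if_neg (by omega)]
    rw [if_pos (by omega)]
    rw [if_neg (by omega)]
    rw [if_pos (by omega)]
    simp only [List.foldl_cons, List.foldl_nil, pvBxor_zero_left]
    simp [PySem.Int.bxor_self]
  · unfold pvChunk pvXorL
    rw [if_neg (by omega)]
    rw [if_neg (by omega)]
    rw [if_pos (by omega)]
    have hp : ((q / 2) % 2 : Int) = 0 := by omega
    rw [hp]
    rw [gAlt_eq, gAlt_eq]
    rw [if_neg (by omega)]
    rw [if_neg (by omega)]
    rw [if_pos (by omega)]
    rw [if_neg (by omega)]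
    rw [if_pos (by omega)]
    simp only [List.foldl_cons, List.foldl_nil, pvBxor_zero_left]
    rw [show s + q - 1 + 1 = PySem.Int.bxor (s + q - 1) 1 from ((pvBxor_one_of_even (s + q - 1) (by omega)).symm)]
    simp [PySem.Int.bxor_comm, pvBxor_zero_left, pvBxor_cancel_left]
  · unfold pvChunk pvXorL
    rw [if_neg (by omega)]
    rw [if_neg (by omega)]
    rw [if_neg (by omega)]
    have hp : ((q / 2) % 2 : Int) = 1 := by omega
    rw [hp]
    rw [gAlt_eq, gAlt_eq]
    rw [if_neg (by omega)]
    rw [if_neg (by omega)]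
    rw [if_neg (by omega)]
    rw [if_neg (by omega)]
    rw [if_pos (by omega)]
    simp only [List.foldl_cons, List.foldl_nil, pvBxor_zero_left]
  · unfold pvChunk pvXorL
    rw [if_neg (by omega)]
    rw [if_neg (by omega)]
    rw [if_pos (by omega)]
    have hp : ((q / 2) % 2 : Int) = 1 := by omega
    rw [hp]
    rw [gAlt_eq, gAlt_eq]
    rw [if_pos (by omega)]
    rw [if_neg (by omega)]
    rw [if_pos (by omega)]
    simp only [List.foldl_cons, List.foldl_nil, pvBxor_zero_left]
  · unfold pvChunk pvXorL
    rw [if_pos (by omega)]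
    have hp : (((q - 2) / 2) % 2 : Int) = 1 := by omega
    rw [hp]
    rw [gAlt_eq, gAlt_eq]
    rw [if_neg (by omega)]
    rw [if_neg (by omega)]
    rw [if_pos (by omega)]
    rw [if_neg (by omega)]
    rw [if_neg (by omega)]
    rw [if_pos (by omega)]
    simp only [List.foldl_cons, List.foldl_nil, pvBxor_zero_left]
    rw [show s + q - 1 + 1 = PySem.Int.bxor (s + q - 1) 1 from ((pvBxor_one_of_even (s + q - 1) (by omega)).symm)]
    rw [show s - 1 + 1 = s from by omega]
    simp [PySem.Int.bxor_comm, pvBxor_left_comm]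
  · unfold pvChunk pvXorL
    rw [if_neg (by omega)]
    rw [if_pos (by omega)]
    have hp : ((q / 2) % 2 : Int) = 0 := by omega
    rw [hp]
    rw [gAlt_eq, gAlt_eq]
    rw [if_neg (by omega)]
    rw [if_neg (by omega)]
    rw [if_neg (by omega)]
    rw [if_neg (by omega)]
    rw [if_neg (by omega)]
    rw [if_pos (by omega)]
    simp only [List.foldl_cons, List.foldl_nil, pvBxor_zero_left]
    rw [show s - 1 + 1 = s from by omega]
    simp [PySem.Int.bxor_zero]
  · unfold pvChunk pvXorL
    rw [if_pos (by omega)]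
    have hp : (((q - 2) / 2) % 2 : Int) = 0 := by omega
    rw [hp]
    rw [gAlt_eq, gAlt_eq]
    rw [if_pos (by omega)]
    rw [if_neg (by omega)]
    rw [if_neg (by omega)]
    rw [if_pos (by omega)]
    simp only [List.foldl_cons, List.foldl_nil, pvBxor_zero_left]
    rw [show s - 1 + 1 = s from by omega]
    simp [PySem.Int.bxor_comm, pvBxor_left_comm, pvBxor_zero_left]
  · unfold pvChunk pvXorL
    rw [if_neg (by omega)]
    rw [if_pos (by omega)]
    have hp : ((q / 2) % 2 : Int) = 1 := by omega
    rw [hp]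
    rw [gAlt_eq, gAlt_eq]
    rw [if_neg (by omega)]
    rw [if_pos (by omega)]
    rw [if_neg (by omega)]
    rw [if_neg (by omega)]
    rw [if_pos (by omega)]
    simp only [List.foldl_cons, List.foldl_nil, pvBxor_zero_left]
    rw [show s - 1 + 1 = s from by omega]
    simp [PySem.Int.bxor_comm]

def pvRows (start L : Int) : Nat → List Int
  | 0 => []
  | n + 1 => pvRows start L n ++ pvChunk (start + n * L) (L - n)

theorem pvFoldA (start L : Int) (n : Nat) :
    (PySem.List.pyRange 0 (n : Int) 1).foldl (solutionStep L) ([], start)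
      = (pvRows start L n, start + n * L) := by
  induction n with
  | zero => simp [PySem.List.pyRange_one_eq_nil (by omega : (0:Int) ≤ 0), pvRows]
  | succ n ih =>
    have hcast : ((n + 1 : Nat) : Int) = (n : Int) + 1 := by push_cast; ring
    rw [hcast, PySem.List.pyRange_one_succ_right (by positivity), List.foldl_append]
    rw [ih]
    simp only [List.foldl_cons, List.foldl_nil, pvStep_eq, pvRows]
    congr 1
    ring

theorem pvFoldB (start L : Int) (n : Nat) :
    (PySem.List.pyRange 0 (n : Int) 1).foldl
      (fun acc i => PySem.Int.bxor acc
        (PySem.Int.bxor (gAlt (start + i * L + (L - i) - 1)) (gAlt (start + i * L - 1)))) 0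
      = pvXorL (pvRows start L n) := by
  induction n with
  | zero => simp [PySem.List.pyRange_one_eq_nil (by omega : (0:Int) ≤ 0), pvRows, pvXorL]
  | succ n ih =>
    have hcast : ((n + 1 : Nat) : Int) = (n : Int) + 1 := by push_cast; ring
    rw [hcast, PySem.List.pyRange_one_succ_right (by positivity), List.foldl_append]
    rw [ih]
    simp only [List.foldl_cons, List.foldl_nil, pvRows]
    rw [show pvXorL (pvRows start L n ++ pvChunk (start + n * L) (L - n))
          = (pvChunk (start + n * L) (L - n)).foldl PySem.Int.bxor (pvXorL (pvRows start L n))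
        from by simp [pvXorL, List.foldl_append]]
    rw [pvFoldl_bxor_init, pvRow_eq]

-- ===== VERDICT (by name: the statement is the Claim_ definition above) =====
theorem solution_spec : Claim_equal_solution := by
  intro start length hdom hpre
  unfold Spec_solution solution solution_alt
  have hn : length = ((length.toNat : Nat) : Int) := by
    have : 0 ≤ length := by exact le_trans (by omega) hpre
    omega
  rw [hn]
  rw [pvFoldA start ((length.toNat : Nat) : Int) length.toNat, pvReduce_eq]
  rw [← pvFoldB start ((length.toNat : Nat) : Int) length.toNat]
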